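-- pv_equiv track=rewrite | github.com/hogan-tech/leetcode-solution | 0786-75-3356-zero-array-transformation-ii/0786-75-3356-zero-array-transformation-ii.py | canFormZeroArray
-- ===== SOURCE A (Python) =====
-- from typing import List
--
-- def canFormZeroArray(nums: List[int], queries: List[List[int]], k: int) -> bool:
--     n = len(nums)
--     totalSum = 0
--     diffArr = [0] * (n + 1)
--
--     for i in range(k):
--         left, right, val = queries[i]
--
--         diffArr[left] += val
--         diffArr[right + 1] -= val
--
--     for i in range(n):
--         totalSum += diffArr[i]
--         if totalSum < nums[i]:
--             return False
--
--     return True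
-- ===== SOURCE B (Python) =====
-- def canFormZeroArray(nums, queries, k):
--     n = len(nums)
--     cov = [0] * n
--     for i in range(k):
--         left, right, val = queries[i]
--         for j in range(left, right + 1):
--             cov[j] += val
--     return all(cov[i] >= nums[i] for i in range(n))
-- ===== Notes on version B (the rewrite author's own statement) =====
-- stated objective: alternative
-- what changed: B accumulates coverage directly per index over each query's range and then checks all indices with all(), instead of A's difference-array with prefix-sum scan and early return; it trades A's O(n+k) for O(k*n) simplicity.
-- outside the precondition, e.g. on canFormZeroArray([0, 0, 0], [[2, 0, 1]], 1): A returns False, B returns True; on canFormZeroArray([0, 0], [[-1, -1, 1]], 1): A returns False, B returns True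
import Mathlib
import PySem

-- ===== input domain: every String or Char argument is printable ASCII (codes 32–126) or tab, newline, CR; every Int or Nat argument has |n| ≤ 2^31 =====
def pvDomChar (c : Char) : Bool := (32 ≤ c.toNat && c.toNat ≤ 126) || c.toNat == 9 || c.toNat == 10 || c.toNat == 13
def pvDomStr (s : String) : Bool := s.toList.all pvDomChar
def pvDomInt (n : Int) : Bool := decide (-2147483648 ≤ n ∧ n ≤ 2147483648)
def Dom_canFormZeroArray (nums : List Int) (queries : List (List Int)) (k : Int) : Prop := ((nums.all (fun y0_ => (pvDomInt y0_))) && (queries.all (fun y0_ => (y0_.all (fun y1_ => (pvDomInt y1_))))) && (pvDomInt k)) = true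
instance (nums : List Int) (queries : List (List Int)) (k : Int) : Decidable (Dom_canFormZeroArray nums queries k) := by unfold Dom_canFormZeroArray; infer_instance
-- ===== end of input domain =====

-- B accumulates coverage per index over each query's range and then checks all indices,
-- instead of A's difference array + prefix-sum scan with early return. Not faster; alternative decomposition.

-- ===== PORT A =====
-- xs[i] += v : exact for 0 ≤ i < xs.length (which Pre_ guarantees at every use)
def pvAddAt (xs : List Int) (i : Int) (v : Int) : List Int :=
  xs.set i.toNat (xs.getD i.toNat 0 + v)

-- the second loop of A: running sum + early return on first shortfall
def pvScanA : List Int → List Int → Int → Bool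
  | [], _, _ => true
  | _ :: _, [], _ => true   -- unreachable: diffArr has length n+1 ≥ nums.length
  | x :: xs, d :: ds, s =>
      let s' := s + d
      if s' < x then false else pvScanA xs ds s'

-- the body of A's first loop: unpack queries[i] and apply the two difference updates
def pvStepA (diff : List Int) (q : List Int) : List Int :=
  match q with
  | [left, right, val] => pvAddAt (pvAddAt diff left val) (right + 1) (-val)
  | _ => diff   -- a query that is not a 3-list raises in Python; excluded by Pre_

def canFormZeroArray (nums : List Int) (queries : List (List Int)) (k : Int) : Bool :=
  let n := nums.length
  let diffArr := (PySem.List.pyRange 0 k 1).foldl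
    (fun diff i => pvStepA diff (PySem.List.pyGetD queries i []))
    (List.replicate (n + 1) 0)
  pvScanA nums diffArr 0

-- ===== PORT B =====
-- cov[i] += val : exact for 0 ≤ i < cov.length (which Pre_ guarantees at every use)
def pvAddAtB (xs : List Int) (i : Int) (v : Int) : List Int :=
  xs.set i.toNat (xs.getD i.toNat 0 + v)

-- the body of B's outer loop: unpack the query and add val over its index range
def pvStepB (cov : List Int) (q : List Int) : List Int :=
  match q with
  | [left, right, val] =>
      (PySem.List.pyRange left (right + 1) 1).foldl (fun c i => pvAddAtB c i val) cov
  | _ => cov   -- unpack of a non-3-list raises in Python; excluded by Pre_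

def canFormZeroArray_alt (nums : List Int) (queries : List (List Int)) (k : Int) : Bool :=
  let n := nums.length
  let cov := (PySem.List.pyRange 0 k 1).foldl
    (fun cov i => pvStepB cov (PySem.List.pyGetD queries i []))
    (List.replicate n 0)
  (PySem.List.pyRange 0 n 1).all
    (fun i => decide (PySem.List.pyGetD cov i 0 ≥ PySem.List.pyGetD nums i 0))

-- ===== PRECONDITION & SPEC =====
-- Pre_ restricts to the problem's natural domain (LeetCode guarantees 0 ≤ left ≤ right < n and
-- 3-element queries for the first k): outside it A raises (k too large, short/long query,
-- out-of-range index), or A returns only by accident of Python semantics — negative-index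
-- wraparound into the difference array, and reversed ranges left > right whose difference
-- updates subtract over the reversed interval; both are degenerate inputs outside the task's domain.
def Pre_canFormZeroArray (nums : List Int) (queries : List (List Int)) (k : Int) : Prop :=
  k ≤ queries.length ∧
  ∀ q ∈ queries.take k.toNat,
    q.length = 3 ∧ 0 ≤ q.getD 0 0 ∧ q.getD 0 0 ≤ q.getD 1 0 ∧ q.getD 1 0 < (nums.length : Int)
instance (nums : List Int) (queries : List (List Int)) (k : Int) : Decidable (Pre_canFormZeroArray nums queries k) := by unfold Pre_canFormZeroArray; infer_instance
def pvWitness_canFormZeroArray : List Int × List (List Int) × Int := ([1, 0, 1], [[1, 2, 1], [0, 2, 1]], 2)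

def Spec_canFormZeroArray (nums : List Int) (queries : List (List Int)) (k : Int) (out : Bool) : Prop := out = canFormZeroArray_alt nums queries k
instance (nums : List Int) (queries : List (List Int)) (k : Int) (out : Bool) : Decidable (Spec_canFormZeroArray nums queries k out) := by unfold Spec_canFormZeroArray; infer_instance

-- ===== CLAIM (what is proved, stated in full; the proofs are below) =====
def Claim_equal_canFormZeroArray : Prop := ∀ (nums : List Int) (queries : List (List Int)) (k : Int), Dom_canFormZeroArray nums queries k → Pre_canFormZeroArray nums queries k → Spec_canFormZeroArray nums queries k (canFormZeroArray nums queries k)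

-- ===== LEMMAS AND PROOFS =====

-- the coverage one (well-formed) query adds at index j
def qContrib (q : List Int) (j : Int) : Int :=
  match q with
  | [l, r, v] => if l ≤ j ∧ j ≤ r then v else 0
  | _ => 0

-- the total coverage a list of (well-formed) queries adds at index j
def covSpec : List (List Int) → Int → Int
  | [], _ => 0
  | q :: qs, j => qContrib q j + covSpec qs j

-- prefix sum of the first j+1 entries of a list
def pref : List Int → Nat → Int
  | [], _ => 0
  | d :: _, 0 => d
  | d :: ds, j + 1 => d + pref ds j

theorem length_pvAddAt (xs : List Int) (i v : Int) : (pvAddAt xs i v).length = xs.length := by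
  simp [pvAddAt]

theorem getD_set_of_lt (xs : List Int) (m j : Nat) (a : Int) (hm : m < xs.length) :
    (xs.set m a).getD j 0 = if j = m then a else xs.getD j 0 := by
  induction xs generalizing m j with
  | nil => simp at hm
  | cons x xs ih =>
    cases m with
    | zero => cases j <;> simp [List.getD]
    | succ m =>
      cases j with
      | zero => simp [List.getD]
      | succ j =>
        simp only [List.set, List.getD_cons_succ]
        rw [ih m j (by simpa using hm)]
        simp

theorem getD_pvAddAt (xs : List Int) (i v : Int) (j : Nat)
    (h0 : 0 ≤ i) (h1 : i < (xs.length : Int)) :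
    (pvAddAt xs i v).getD j 0 = if (j : Int) = i then xs.getD j 0 + v else xs.getD j 0 := by
  have hm : i.toNat < xs.length := by omega
  rw [pvAddAt, getD_set_of_lt xs i.toNat j _ hm]
  have : ((j : Int) = i) ↔ (j = i.toNat) := by omega
  simp only [this]
  split <;> simp_all

theorem pref_pvAddAt (xs : List Int) (i v : Int) (j : Nat)
    (h0 : 0 ≤ i) (h1 : i < (xs.length : Int)) :
    pref (pvAddAt xs i v) j = pref xs j + if i ≤ (j : Int) then v else 0 := by
  induction xs generalizing i j with
  | nil => simp only [List.length_nil, Int.natCast_zero] at h1; omega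
  | cons x xs ih =>
    by_cases hi : i = 0
    · subst hi
      cases j with
      | zero => simp [pvAddAt, pref]
      | succ j =>
        simp only [pvAddAt, Int.toNat_zero, List.set_cons_zero, List.getD_cons_zero, pref]
        rw [if_pos (by omega)]; ring
    · have hpos : 0 < i := by omega
      have : (pvAddAt (x :: xs) i v) = x :: pvAddAt xs (i - 1) v := by
        have h2 : i.toNat = (i - 1).toNat + 1 := by omega
        simp only [pvAddAt, h2, List.set_cons_succ, List.getD_cons_succ]
      rw [this]
      cases j with
      | zero =>
        have : ¬ i ≤ (0 : Int) := by omega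
        simp [pref, this]
      | succ j =>
        simp only [pref]
        rw [ih (i - 1) j (by omega) (by simp at h1 ⊢; omega)]
        have : ((i - 1) ≤ (j : Int)) ↔ (i ≤ ((j + 1 : Nat) : Int)) := by push_cast; omega
        simp only [this]; ring

-- ===== A side: the difference-array fold =====

def qOK (n : Nat) (q : List Int) : Prop :=
  q.length = 3 ∧ 0 ≤ q.getD 0 0 ∧ q.getD 0 0 ≤ q.getD 1 0 ∧ q.getD 1 0 < (n : Int)

theorem length_pvStepA (diff q : List Int) : (pvStepA diff q).length = diff.length := by
  unfold pvStepA
  split <;> simp [length_pvAddAt]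

theorem pref_pvStepA (n : Nat) (diff q : List Int) (j : Nat)
    (hlen : diff.length = n + 1) (hq : qOK n q) :
    pref (pvStepA diff q) j = pref diff j + qContrib q (j : Int) := by
  obtain ⟨hq3, hq0, hq01, hq1⟩ := hq
  match q, hq3 with
  | [l, r, v], _ =>
    simp only [List.getD_cons_succ, List.getD_cons_zero] at hq0 hq01 hq1
    simp only [pvStepA, qContrib]
    rw [pref_pvAddAt _ _ _ _ (by omega)
        (by rw [length_pvAddAt, hlen]; push_cast; omega),
       pref_pvAddAt _ _ _ _ hq0 (by rw [hlen]; push_cast; omega)]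
    split_ifs <;> omega

theorem pref_diffFold (n : Nat) (qs : List (List Int)) (diff : List Int) (j : Nat)
    (hlen : diff.length = n + 1) (hqs : ∀ q ∈ qs, qOK n q) :
    pref (qs.foldl pvStepA diff) j = pref diff j + covSpec qs j := by
  induction qs generalizing diff with
  | nil => simp [covSpec]
  | cons q qs ih =>
    simp only [List.foldl_cons, covSpec]
    rw [ih (pvStepA diff q) (by rw [length_pvStepA]; exact hlen)
        (fun q hq => hqs q (by simp [hq])),
       pref_pvStepA n diff q j hlen (hqs q (by simp))]
    ring

theorem scan_eq (nums diff : List Int) (s : Int) (hlen : nums.length ≤ diff.length) :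
    pvScanA nums diff s =
      decide (∀ j, (h : j < nums.length) → nums[j] ≤ s + pref diff j) := by
  induction nums generalizing diff s with
  | nil => simp [pvScanA]
  | cons x xs ih =>
    match diff, hlen with
    | d :: ds, hlen =>
      simp only [pvScanA]
      by_cases hx : s + d < x
      · simp only [if_pos hx]
        have : ¬ (∀ j, (h : j < (x :: xs).length) → (x :: xs)[j] ≤ s + pref (d :: ds) j) := by
          intro h
          have := h 0 (by simp)
          simp [pref] at this
          omega
        exact (decide_eq_false this).symm
      · simp only [if_neg hx]
        rw [ih ds (s + d) (by simpa using hlen)]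
        rw [decide_eq_decide]
        constructor
        · intro h j hj
          cases j with
          | zero => simp [pref]; omega
          | succ j =>
            have := h j (by simpa using hj)
            simpa [pref, add_assoc] using this
        · intro h j hj
          have := h (j + 1) (by simpa using hj)
          simpa [pref, add_assoc] using this

-- ===== B side: the coverage fold =====

theorem pvAddAtB_eq_fun (v : Int) :
    (fun (c : List Int) (i : Int) => pvAddAtB c i v) = fun c i => pvAddAt c i v := rfl

theorem length_rangeFold (a b v : Int) (c : List Int) :
    ((PySem.List.pyRange a b 1).foldl (fun c i => pvAddAtB c i v) c).length = c.length := by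
  rw [pvAddAtB_eq_fun]
  generalize hN : (b - a).toNat = N
  induction N generalizing a c with
  | zero => rw [PySem.List.pyRange_one_eq_nil (by omega)]; simp
  | succ N ih =>
    rw [PySem.List.pyRange_one_cons (by omega)]
    simp only [List.foldl_cons]
    rw [ih (a + 1) _ (by omega), length_pvAddAt]

theorem getD_rangeFold (a b v : Int) (c : List Int) (j : Nat)
    (ha : 0 ≤ a) (hb : b ≤ (c.length : Int)) :
    ((PySem.List.pyRange a b 1).foldl (fun c i => pvAddAtB c i v) c).getD j 0 =
      c.getD j 0 + if a ≤ (j : Int) ∧ (j : Int) < b then v else 0 := by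
  rw [pvAddAtB_eq_fun]
  generalize hN : (b - a).toNat = N
  induction N generalizing a c with
  | zero =>
    rw [PySem.List.pyRange_one_eq_nil (by omega)]
    simp only [List.foldl_nil]
    have : ¬ (a ≤ (j : Int) ∧ (j : Int) < b) := by omega
    simp [this]
  | succ N ih =>
    have hab : a < b := by omega
    rw [PySem.List.pyRange_one_cons hab]
    simp only [List.foldl_cons]
    rw [ih (a + 1) (pvAddAt c a v) (by omega) (by rw [length_pvAddAt]; exact hb) (by omega),
       getD_pvAddAt c a v j ha (by omega)]
    split_ifs <;> omega

theorem length_pvStepB (cov q : List Int) : (pvStepB cov q).length = cov.length := by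
  unfold pvStepB
  split <;> simp [length_rangeFold]

theorem getD_pvStepB (n : Nat) (cov q : List Int) (j : Nat)
    (hlen : cov.length = n) (hq : qOK n q) :
    (pvStepB cov q).getD j 0 = cov.getD j 0 + qContrib q (j : Int) := by
  obtain ⟨hq3, hq0, hq01, hq1⟩ := hq
  match q, hq3 with
  | [l, r, v], _ =>
    simp only [List.getD_cons_succ, List.getD_cons_zero] at hq0 hq01 hq1
    simp only [pvStepB, qContrib]
    rw [getD_rangeFold l (r + 1) v cov j hq0 (by rw [hlen]; omega)]
    have : (l ≤ (j : Int) ∧ (j : Int) < r + 1) ↔ (l ≤ (j : Int) ∧ (j : Int) ≤ r) := by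
      omega
    simp only [this]

theorem getD_covFold (n : Nat) (qs : List (List Int)) (cov : List Int) (j : Nat)
    (hlen : cov.length = n) (hqs : ∀ q ∈ qs, qOK n q) :
    (qs.foldl pvStepB cov).getD j 0 = cov.getD j 0 + covSpec qs j := by
  induction qs generalizing cov with
  | nil => simp [covSpec]
  | cons q qs ih =>
    simp only [List.foldl_cons, covSpec]
    rw [ih (pvStepB cov q) (by rw [length_pvStepB]; exact hlen)
        (fun q hq => hqs q (by simp [hq])),
       getD_pvStepB n cov q j hlen (hqs q (by simp))]
    ring

-- both folds run over exactly the first k queries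
theorem foldA_eq_take (queries : List (List Int)) (k : Int) (f : List Int → List Int → List Int)
    (init : List Int) (hk : k ≤ queries.length) :
    (PySem.List.pyRange 0 k 1).foldl (fun acc i => f acc (PySem.List.pyGetD queries i [])) init =
      (queries.take k.toNat).foldl f init := by
  by_cases h0 : 0 ≤ k
  case neg =>
    rw [PySem.List.pyRange_one_eq_nil (by omega)]
    have hz : k.toNat = 0 := by omega
    simp [hz]
  have hlen : ((queries.take k.toNat).length : Int) = k := by
    simp [List.length_take]; omega
  have h1 : (PySem.List.pyRange 0 k 1).foldl
        (fun acc i => f acc (PySem.List.pyGetD queries i [])) init =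
      (PySem.List.pyRange 0 k 1).foldl
        (fun acc i => f acc (PySem.List.pyGetD (queries.take k.toNat) i [])) init := by
    apply PySem.List.foldl_congr_mem
    intro acc x hx
    rw [PySem.List.mem_pyRange_one] at hx
    congr 1
    rw [PySem.List.pyGetD_eq_getElem queries [] hx.1 (by omega),
       PySem.List.pyGetD_eq_getElem (queries.take k.toNat) [] hx.1
         (by simp [List.length_take]; omega)]
    rw [List.getElem_take]
  have h2 := PySem.List.foldl_pyRange_zero_pyGetD' (queries.take k.toNat) ([] : List Int) f init
  rw [hlen] at h2
  rw [h1, h2]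

theorem pref_replicate_zero (m j : Nat) : pref (List.replicate m 0) j = 0 := by
  induction m generalizing j with
  | zero => simp [pref]
  | succ m ih =>
    cases j <;> simp [List.replicate, pref, ih]


theorem length_foldl_pvStepA (qs : List (List Int)) (d : List Int) :
    (qs.foldl pvStepA d).length = d.length := by
  induction qs generalizing d with
  | nil => rfl
  | cons q qs ih => simp only [List.foldl_cons]; rw [ih, length_pvStepA]

theorem length_foldl_pvStepB (qs : List (List Int)) (c : List Int) :
    (qs.foldl pvStepB c).length = c.length := by
  induction qs generalizing c with
  | nil => rfl
  | cons q qs ih => simp only [List.foldl_cons]; rw [ih, length_pvStepB]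

theorem getD_replicate_zero (m j : Nat) : (List.replicate m (0 : Int)).getD j 0 = 0 := by
  induction m generalizing j with
  | zero => simp
  | succ m ih => cases j <;> simp [List.replicate, List.getD]

-- ===== VERDICT (by name: the statement is the Claim_ definition above) =====
theorem canFormZeroArray_spec : Claim_equal_canFormZeroArray := by
  intro nums queries k _ hpre
  obtain ⟨hk, hqs⟩ := hpre
  unfold Spec_canFormZeroArray canFormZeroArray canFormZeroArray_alt
  simp only []
  rw [foldA_eq_take queries k pvStepA _ hk,
     foldA_eq_take queries k (fun cov q => pvStepB cov q) _ hk]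
  set n := nums.length with hn
  set qs := queries.take k.toNat with hqsdef
  have hqok : ∀ q ∈ qs, qOK n q := hqs
  set diff := qs.foldl pvStepA (List.replicate (n + 1) 0) with hdiff
  set cov := qs.foldl pvStepB (List.replicate n 0) with hcov
  have hdlen : diff.length = n + 1 := by rw [hdiff, length_foldl_pvStepA]; simp
  have hclen : cov.length = n := by rw [hcov, length_foldl_pvStepB]; simp
  have hpref : ∀ j : Nat, j < n → pref diff j = covSpec qs (j : Int) := by
    intro j hj
    rw [hdiff, pref_diffFold n qs _ j (by simp) hqok, pref_replicate_zero]
    ring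
  have hcovD : ∀ j : Nat, j < n → cov.getD j 0 = covSpec qs (j : Int) := by
    intro j hj
    rw [hcov, getD_covFold n qs _ j (by simp) hqok, getD_replicate_zero]
    ring
  rw [scan_eq nums diff 0 (by omega)]
  rw [Bool.eq_iff_iff]
  simp only [List.all_eq_true, decide_eq_true_eq, PySem.List.mem_pyRange_one]
  constructor
  · intro h i hi
    obtain ⟨hi0, hin⟩ := hi
    have hj : i.toNat < n := by omega
    have hic : ((i.toNat : Nat) : Int) = i := by omega
    rw [PySem.List.pyGetD_eq_getElem cov 0 hi0 (by omega),
       PySem.List.pyGetD_eq_getElem nums 0 hi0 (by omega)]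
    have := h i.toNat hj
    rw [hpref i.toNat hj] at this
    have hce : cov[i.toNat] = cov.getD i.toNat 0 := by
      rw [List.getD_eq_getElem cov 0 (by omega)]
    rw [hce, hcovD i.toNat hj, hic]
    rw [hic] at this
    simpa using this
  · intro h j hj
    have := h (j : Int) ⟨by omega, by omega⟩
    rw [PySem.List.pyGetD_eq_getElem cov 0 (by omega) (by omega),
       PySem.List.pyGetD_eq_getElem nums 0 (by omega) (by omega)] at this
    have hce : cov[((j : Int)).toNat] = cov.getD j 0 := by
      rw [List.getD_eq_getElem cov 0 (by omega)]
      simp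
    rw [hce, hcovD j hj] at this
    rw [hpref j hj]
    simp only [Int.toNat_natCast] at this
    simpa using this
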